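-- pv_equiv track=rewrite | github.com/zby152/codes | python/蓝桥杯/搜索/排列小球.py | find
-- ===== SOURCE A (Python) =====
-- def find(y):
--     t=[1]
--     for i in range(1,len(y)):
--         if y[i]==y[i-1]:
--             t[-1]+=1
--         else:
--             t.append(1)
--     for i in range(1,len(t)):
--         if t[i-1]>=t[i]:
--             return False
--     return True
-- ===== SOURCE B (Python) =====
-- def find(y):
--     if not y:
--         return True
--     prev = None  # length of the last completed run
--     cur = 1
--     last = y[0]
--     for v in y[1:]:
--         if v == last:
--             cur += 1
--         else:
--             if prev is not None and prev >= cur: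
--                 return False
--             prev = cur
--             cur = 1
--             last = v
--     return prev is None or prev < cur
-- ===== Notes on version B (the rewrite author's own statement) =====
-- stated objective: alternative
-- what changed: B fuses A's two passes into a single pass that tracks the current run length and the previous completed run length, comparing runs on the fly instead of building the run-length list and scanning it afterwards.
import Mathlib
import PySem

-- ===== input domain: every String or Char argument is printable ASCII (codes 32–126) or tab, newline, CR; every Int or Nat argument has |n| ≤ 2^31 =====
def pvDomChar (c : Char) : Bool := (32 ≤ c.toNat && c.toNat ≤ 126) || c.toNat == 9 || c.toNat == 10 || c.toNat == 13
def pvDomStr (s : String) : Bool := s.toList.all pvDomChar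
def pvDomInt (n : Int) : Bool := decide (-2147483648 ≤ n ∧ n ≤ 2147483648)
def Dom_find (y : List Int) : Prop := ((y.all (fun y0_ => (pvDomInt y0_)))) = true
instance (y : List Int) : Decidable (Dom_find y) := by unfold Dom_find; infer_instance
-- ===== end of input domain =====

-- B fuses A's two passes into one pass comparing run lengths on the fly; same O(n) cost, no run-length list built.

-- ===== PORT A =====
-- t[-1] += 1 on a nonempty list
def incLast : List Int → List Int
  | [] => []
  | [a] => [a + 1]
  | a :: b :: rest => a :: incLast (b :: rest)

-- first loop of A: walk y keeping the previous element, building t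
def buildT : List Int → Int → List Int → List Int
  | t, _, [] => t
  | t, prev, v :: rest =>
      if v = prev then buildT (incLast t) v rest else buildT (t ++ [1]) v rest

-- second loop of A: scan adjacent pairs of t, early return False
def chain : List Int → Bool
  | a :: b :: rest => if a ≥ b then false else chain (b :: rest)
  | _ => true

def find (y : List Int) : Bool :=
  match y with
  | [] => chain [1]
  | a :: rest => chain (buildT [1] a rest)

-- ===== PORT B =====
def find_alt_loop : Option Int → Int → Int → List Int → Bool
  | prev, cur, _, [] =>
      match prev with
      | none => true
      | some p => decide (p < cur)
  | prev, cur, last, v :: rest =>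
      if v = last then find_alt_loop prev (cur + 1) last rest
      else
        match prev with
        | some p =>
            if p ≥ cur then false
            else find_alt_loop (some cur) 1 v rest
        | none => find_alt_loop (some cur) 1 v rest

def find_alt (y : List Int) : Bool :=
  match y with
  | [] => true
  | a :: rest => find_alt_loop none 1 a rest

-- ===== PRECONDITION & SPEC =====
def Spec_find (y : List Int) (out : Bool) : Prop := out = find_alt y
instance (y : List Int) (out : Bool) : Decidable (Spec_find y out) := by unfold Spec_find; infer_instance

-- ===== CLAIM (what is proved, stated in full; the proofs are below) =====
def Claim_equal_find : Prop := ∀ (y : List Int), Dom_find y → Spec_find y (find y)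

-- ===== LEMMAS AND PROOFS =====

lemma incLast_ne_nil (t : List Int) (h : t ≠ []) : incLast t ≠ [] := by
  cases t with
  | nil => exact absurd rfl h
  | cons a t => cases t <;> simp [incLast]

lemma incLast_cons (a : Int) (t : List Int) (h : t ≠ []) :
    incLast (a :: t) = a :: incLast t := by
  cases t with
  | nil => exact absurd rfl h
  | cons b t => rfl

lemma buildT_cons (rest : List Int) : ∀ (t : List Int) (a last : Int), t ≠ [] →
    buildT (a :: t) last rest = a :: buildT t last rest := by
  induction rest with
  | nil => intro t a last _; rfl
  | cons v rest ih =>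
      intro t a last ht
      by_cases h : v = last
      · simp only [buildT, if_pos h, incLast_cons a t ht]
        exact ih (incLast t) a v (incLast_ne_nil t ht)
      · simp only [buildT, if_neg h, List.cons_append]
        exact ih (t ++ [1]) a v (by simp)

lemma key (rest : List Int) : ∀ (cur last : Int) (prev : Option Int),
    find_alt_loop prev cur last rest =
      chain (match prev with
             | none => buildT [cur] last rest
             | some p => buildT [p, cur] last rest) := by
  induction rest with
  | nil =>
      intro cur last prev
      cases prev with
      | none => rfl
      | some p =>
          simp only [find_alt_loop, buildT, chain]
          by_cases h : p < cur
          · simp [h, not_le.mpr h]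
          · simp [h, not_lt.mp h]
  | cons v rest ih =>
      intro cur last prev
      by_cases h : v = last
      · cases prev with
        | none =>
            simp only [find_alt_loop, if_pos h, buildT, incLast]
            rw [ih (cur + 1) last none]; subst h; rfl
        | some p =>
            simp only [find_alt_loop, if_pos h, buildT, incLast]
            rw [ih (cur + 1) last (some p)]
            subst h
            rfl
      · cases prev with
        | none =>
            simp only [find_alt_loop, if_neg h, buildT]
            rw [ih 1 v (some cur)]
            rfl
        | some p =>
            simp only [find_alt_loop, if_neg h, buildT]
            by_cases hp : p ≥ cur
            · rw [if_pos hp]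
              rw [List.cons_append, buildT_cons rest ([cur] ++ [1]) p v (by simp)]
              simp only [List.singleton_append, buildT_cons rest [1] cur v (by simp)]
              simp [chain, hp]
            · rw [if_neg hp]
              rw [ih 1 v (some cur)]
              rw [List.cons_append, buildT_cons rest ([cur] ++ [1]) p v (by simp)]
              simp only [List.singleton_append, buildT_cons rest [1] cur v (by simp)]
              simp [chain, hp]

-- ===== VERDICT (by name: the statement is the Claim_ definition above) =====
theorem find_spec : Claim_equal_find := by
  intro y _
  unfold Spec_find
  cases y with
  | nil => rfl
  | cons a rest =>
      show find (a :: rest) = find_alt (a :: rest)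
      simp only [find, find_alt]
      rw [key rest 1 a none]
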